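-- pv_equiv track=rewrite | github.com/vinaybysani/Image-Captioning-System--Deep-learning | testing.py | cap_end
-- ===== SOURCE A (Python) =====
-- def cap_end(caption):
--     cap = caption.split()[1:]
--     try:
--         end = cap.index('<end>')
--         cap = cap[:end]
--     except:
--         pass
--
--     return " ".join([i for i in cap])
-- ===== SOURCE B (Python) =====
-- def cap_end(caption):
--     out = []
--     for w in caption.split()[1:]:
--         if w == '<end>':
--             break
--         out.append(w)
--     return " ".join(out)
-- ===== Notes on version B (the rewrite author's own statement) =====
-- stated objective: simpler
-- what changed: Replaced the try/except index-then-slice with a single forward scan that stops at the first end marker, accumulating the kept words in one pass.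
import Mathlib
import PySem

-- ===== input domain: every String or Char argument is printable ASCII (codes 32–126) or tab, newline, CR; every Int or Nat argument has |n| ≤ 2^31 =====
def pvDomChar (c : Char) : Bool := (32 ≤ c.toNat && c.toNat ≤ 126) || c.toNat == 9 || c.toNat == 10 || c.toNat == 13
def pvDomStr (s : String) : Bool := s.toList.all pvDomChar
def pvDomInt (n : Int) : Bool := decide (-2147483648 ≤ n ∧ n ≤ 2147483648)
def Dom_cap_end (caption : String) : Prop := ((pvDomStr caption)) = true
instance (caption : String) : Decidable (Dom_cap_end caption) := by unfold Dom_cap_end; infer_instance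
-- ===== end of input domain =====

-- B replaces A's try/except index-then-slice with a single forward scan stopping at '<end>' (simpler decomposition).

-- ===== PORT A =====
-- cap.index('<end>') then cap[:end]; the except branch leaves cap unchanged
def capTrimA (cap : List String) : List String :=
  match PySem.List.index? cap "<end>" with
  | some e => PySem.List.slice cap none (some (e : Int))
  | none => cap

def cap_end (caption : String) : String :=
  let cap := PySem.List.slice (PySem.Str.split₀ caption) (some 1) none
  PySem.Str.join " " (capTrimA cap)

-- ===== PORT B =====
-- the loop of Source B: append until '<end>', then break
def capScanB : List String → List String
  | [] => []
  | w :: ws => if w = "<end>" then [] else w :: capScanB ws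

def cap_end_alt (caption : String) : String :=
  PySem.Str.join " " (capScanB (PySem.List.slice (PySem.Str.split₀ caption) (some 1) none))

-- ===== PRECONDITION & SPEC =====
def Spec_cap_end (caption : String) (out : String) : Prop := out = cap_end_alt caption
instance (caption : String) (out : String) : Decidable (Spec_cap_end caption out) := by unfold Spec_cap_end; infer_instance

-- ===== CLAIM (what is proved, stated in full; the proofs are below) =====
def Claim_equal_cap_end : Prop := ∀ (caption : String), Dom_cap_end caption → Spec_cap_end caption (cap_end caption)

-- ===== LEMMAS AND PROOFS =====
theorem capTrimA_eq_capScanB (l : List String) : capTrimA l = capScanB l := by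
  induction l with
  | nil => simp [capTrimA, capScanB, PySem.List.index?]
  | cons w ws ih =>
    by_cases hw : w = "<end>"
    · subst hw
      rw [capTrimA, PySem.List.index?_cons_self]
      show PySem.List.slice _ none (some ((0 : Nat) : Int)) = _
      rw [PySem.List.slice_to_natCast]
      simp [capScanB]
    · rw [capTrimA, PySem.List.index?_cons_of_ne ws hw]
      cases h : PySem.List.index? ws "<end>" with
      | none =>
        have h' := h
        rw [PySem.List.index?_eq_idxOf?] at h'
        simp only [capTrimA, PySem.List.index?_eq_idxOf?, h'] at ih
        simp only [Option.map_none, capScanB, if_neg hw]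
        exact congrArg (w :: ·) ih
      | some e =>
        simp only [capTrimA, h] at ih
        rw [PySem.List.slice_to_natCast] at ih
        simp only [Option.map_some, capScanB, if_neg hw]
        rw [PySem.List.slice_to_natCast]
        simp [List.take_succ_cons, ih]

-- ===== VERDICT (by name: the statement is the Claim_ definition above) =====
theorem cap_end_spec : Claim_equal_cap_end := by
  intro caption _
  unfold Spec_cap_end cap_end cap_end_alt
  simp only [capTrimA_eq_capScanB]
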